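-- pv_equiv track=rewrite | github.com/qaz17899/funbot | scripts/parsers/parse_routes.py | parse_arguments
-- ===== SOURCE A (Python) =====
-- def parse_arguments(arg_string: str) -> list[str]:
--     """
--     Split arguments respecting brackets and quotes.
--
--     Handles: `arg1, arg2, new Class(arg3, arg4), [item1, item2]`
--     Returns: ['arg1', 'arg2', 'new Class(arg3, arg4)', '[item1, item2]']
--     """
--     args = []
--     current_arg = ""
--     bracket_level = 0
--     square_level = 0
--     in_string = False
--     string_char = None
--     prev_char = ""
--
--     for char in arg_string:
--         # Track string state - handle escaped quotes
--         if char in ("'", '"', "`") and prev_char != "\\":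
--             if not in_string:
--                 in_string = True
--                 string_char = char
--             elif char == string_char:
--                 in_string = False
--                 string_char = None
--
--         # Track bracket levels
--         if not in_string:
--             if char == "(":
--                 bracket_level += 1
--             elif char == ")":
--                 bracket_level -= 1
--             elif char == "[":
--                 square_level += 1
--             elif char == "]":
--                 square_level -= 1
--
--         # Split on top-level commas only
--         if char == "," and bracket_level == 0 and square_level == 0 and not in_string:
--             args.append(current_arg.strip())
--             current_arg = ""
--         else:
--             current_arg += char
--
--         prev_char = char
--
--     if current_arg.strip():
--         args.append(current_arg.strip())
--
--     return args
-- ===== SOURCE B (Python) =====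
-- def parse_arguments(arg_string: str) -> list[str]:
--     """Two-phase split: first record indices of top-level commas, then slice."""
--     commas = []
--     bracket_level = 0
--     square_level = 0
--     in_string = False
--     string_char = None
--     prev_char = ""
--
--     for i, char in enumerate(arg_string):
--         if char in ("'", '"', "`") and prev_char != "\\":
--             if not in_string:
--                 in_string = True
--                 string_char = char
--             elif char == string_char:
--                 in_string = False
--                 string_char = None
--         if not in_string:
--             if char == "(":
--                 bracket_level += 1
--             elif char == ")":
--                 bracket_level -= 1
--             elif char == "[":
--                 square_level += 1
--             elif char == "]":
--                 square_level -= 1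
--         if char == "," and bracket_level == 0 and square_level == 0 and not in_string:
--             commas.append(i)
--         prev_char = char
--
--     args = []
--     prev = 0
--     for c in commas:
--         args.append(arg_string[prev:c].strip())
--         prev = c + 1
--     tail = arg_string[prev:].strip()
--     if tail:
--         args.append(tail)
--     return args
-- ===== Notes on version B (the rewrite author's own statement) =====
-- stated objective: alternative
-- what changed: Instead of accumulating each argument character-by-character during the scan, B records the indices of top-level commas in one pass and then produces the arguments by slicing the string between consecutive indices.
import Mathlib
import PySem

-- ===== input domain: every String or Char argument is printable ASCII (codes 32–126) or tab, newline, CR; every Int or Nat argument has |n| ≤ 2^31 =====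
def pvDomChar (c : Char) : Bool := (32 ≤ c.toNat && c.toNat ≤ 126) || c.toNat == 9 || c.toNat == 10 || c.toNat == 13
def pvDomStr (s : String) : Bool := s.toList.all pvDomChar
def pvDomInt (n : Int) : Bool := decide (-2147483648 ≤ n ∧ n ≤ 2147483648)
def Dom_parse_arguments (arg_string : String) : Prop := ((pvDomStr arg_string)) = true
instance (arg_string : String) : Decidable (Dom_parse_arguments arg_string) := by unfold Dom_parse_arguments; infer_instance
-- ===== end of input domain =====

-- B replaces A's running string accumulator by a two-phase decomposition: record the
-- indices of top-level commas in one scan, then cut the string into slices (objective: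
-- alternative decomposition, same cost).

-- shared scanner-state transitions (identical character-by-character branches in both Pythons):
-- string state with escaped quotes → (in_string', string_char')
def pvQuote (c : Char) (ins : Bool) (sc prev : Option Char) : Bool × Option Char :=
  if (c = '\'' ∨ c = '"' ∨ c = '`') ∧ prev ≠ some '\\' then
    if ins = false then (true, some c)
    else if some c = sc then (false, none)
    else (ins, sc)
  else (ins, sc)

-- bracket levels → (bracket_level', square_level')
def pvBrackets (c : Char) (ins : Bool) (bl sl : Int) : Int × Int :=
  if ins = false then
    if c = '(' then (bl + 1, sl)
    else if c = ')' then (bl - 1, sl)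
    else if c = '[' then (bl, sl + 1)
    else if c = ']' then (bl, sl - 1)
    else (bl, sl)
  else (bl, sl)

-- ===== PORT A =====
-- A's loop: accumulate current_arg, flush it (stripped) at each top-level comma;
-- the [] case is the code after the loop (append stripped remainder if truthy).
def paLoop : List Char → List (List Char) → List Char → Int → Int → Bool → Option Char → Option Char → List (List Char)
  | [], args, cur, _, _, _, _, _ =>
      if PySem.Chars.strip cur ≠ [] then args ++ [PySem.Chars.strip cur] else args
  | c :: rest, args, cur, bl, sl, ins, sc, prev =>
      let q := pvQuote c ins sc prev
      let b := pvBrackets c q.1 bl sl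
      if c = ',' ∧ b.1 = 0 ∧ b.2 = 0 ∧ q.1 = false then
        paLoop rest (args ++ [PySem.Chars.strip cur]) [] b.1 b.2 q.1 q.2 (some c)
      else
        paLoop rest args (cur ++ [c]) b.1 b.2 q.1 q.2 (some c)

def parse_arguments (arg_string : String) : List String :=
  (paLoop arg_string.toList [] [] 0 0 false none none).map String.ofList

-- ===== PORT B =====
-- phase 1: same scanner, but only collect the indices of top-level commas
def pbScan : List Char → Nat → Int → Int → Bool → Option Char → Option Char → List Nat
  | [], _, _, _, _, _, _ => []
  | c :: rest, i, bl, sl, ins, sc, prev =>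
      let q := pvQuote c ins sc prev
      let b := pvBrackets c q.1 bl sl
      if c = ',' ∧ b.1 = 0 ∧ b.2 = 0 ∧ q.1 = false then
        i :: pbScan rest (i + 1) b.1 b.2 q.1 q.2 (some c)
      else
        pbScan rest (i + 1) b.1 b.2 q.1 q.2 (some c)

-- phase 2: slice between consecutive comma indices; the [] case is the tail segment
def pbSplit (cs : List Char) : List Nat → List (List Char) → Nat → List (List Char)
  | [], args, prev =>
      let tail := PySem.Chars.strip (PySem.List.slice cs (some (prev : Int)) none)
      if tail ≠ [] then args ++ [tail] else args
  | j :: rest, args, prev =>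
      pbSplit cs rest
        (args ++ [PySem.Chars.strip (PySem.List.slice cs (some (prev : Int)) (some (j : Int)))])
        (j + 1)

def parse_arguments_alt (arg_string : String) : List String :=
  (pbSplit arg_string.toList (pbScan arg_string.toList 0 0 0 false none none) [] 0).map String.ofList

-- ===== PRECONDITION & SPEC =====
def Spec_parse_arguments (arg_string : String) (out : List String) : Prop := out = parse_arguments_alt arg_string
instance (arg_string : String) (out : List String) : Decidable (Spec_parse_arguments arg_string out) := by unfold Spec_parse_arguments; infer_instance

-- ===== CLAIM (what is proved, stated in full; the proofs are below) =====
def Claim_equal_parse_arguments : Prop := ∀ (arg_string : String), Dom_parse_arguments arg_string → Spec_parse_arguments arg_string (parse_arguments arg_string)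

-- ===== LEMMAS AND PROOFS =====

-- the segments B's phase 2 produces, without the accumulator
def pvSegs (cs : List Char) : Nat → List Nat → List (List Char)
  | p, [] =>
      if PySem.Chars.strip (cs.drop p) ≠ [] then [PySem.Chars.strip (cs.drop p)] else []
  | p, j :: rest =>
      PySem.Chars.strip ((cs.drop p).take (j - p)) :: pvSegs cs (j + 1) rest

theorem pbSplit_eq_segs (cs : List Char) (commas : List Nat) (args : List (List Char)) (p : Nat) :
    pbSplit cs commas args p = args ++ pvSegs cs p commas := by
  induction commas generalizing args p with
  | nil =>
      simp only [pbSplit, pvSegs, PySem.List.slice_from_natCast]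
      split <;> simp
  | cons j rest ih =>
      simp only [pbSplit, pvSegs, PySem.List.slice_natCast, ih, List.append_assoc,
        List.singleton_append]

theorem paLoop_eq_segs (l done : List Char) (args : List (List Char)) (bl sl : Int)
    (ins : Bool) (sc prev : Option Char) (p : Nat) (hp : p ≤ done.length) :
    paLoop l args (done.drop p) bl sl ins sc prev
      = args ++ pvSegs (done ++ l) p (pbScan l done.length bl sl ins sc prev) := by
  induction l generalizing done args bl sl ins sc prev p with
  | nil => simp [paLoop, pbScan, pvSegs]; split <;> simp
  | cons c rest ih =>
      simp only [paLoop, pbScan]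
      by_cases h : c = ',' ∧ (pvBrackets c (pvQuote c ins sc prev).1 bl sl).1 = 0 ∧
          (pvBrackets c (pvQuote c ins sc prev).1 bl sl).2 = 0 ∧ (pvQuote c ins sc prev).1 = false
      · simp only [if_pos h]
        have hnil : (done ++ [c]).drop (done.length + 1) = [] := by simp
        have := ih (done ++ [c]) (args ++ [PySem.Chars.strip (done.drop p)])
          (pvBrackets c (pvQuote c ins sc prev).1 bl sl).1
          (pvBrackets c (pvQuote c ins sc prev).1 bl sl).2
          (pvQuote c ins sc prev).1 (pvQuote c ins sc prev).2 (some c)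
          (done.length + 1) (by simp)
        rw [hnil] at this
        rw [this]
        have hdrop : (done ++ c :: rest).drop p = done.drop p ++ c :: rest :=
          List.drop_append_of_le_length hp
        have htake : ((done ++ c :: rest).drop p).take (done.length - p) = done.drop p := by
          rw [hdrop]
          exact List.take_left' (by simp)
        simp [pvSegs, htake, List.append_assoc]
      · simp only [if_neg h]
        have hcur : (done ++ [c]).drop p = done.drop p ++ [c] :=
          List.drop_append_of_le_length hp
        have := ih (done ++ [c]) args
          (pvBrackets c (pvQuote c ins sc prev).1 bl sl).1
          (pvBrackets c (pvQuote c ins sc prev).1 bl sl).2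
          (pvQuote c ins sc prev).1 (pvQuote c ins sc prev).2 (some c)
          p (by simp; omega)
        rw [hcur] at this
        rw [this]
        simp [List.append_assoc]

-- ===== VERDICT (by name: the statement is the Claim_ definition above) =====
theorem parse_arguments_spec : Claim_equal_parse_arguments := by
  intro s _hDom
  unfold Spec_parse_arguments parse_arguments parse_arguments_alt
  rw [pbSplit_eq_segs]
  have := paLoop_eq_segs s.toList [] [] 0 0 false none none 0 (by simp)
  simp only [List.drop_nil, List.nil_append, List.length_nil] at this
  rw [this]
  simp
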